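-- pv_equiv track=rewrite | github.com/BrenoGustavo/AdventoOfCode | 2024/solutions/day_15.py | expand_grid_str
-- ===== SOURCE A (Python) =====
-- def expand_grid_str(grid_str):
--     new_grid = []
--     for row in grid_str:
--         line = (
--             row.replace("#", "##")
--             .replace("O", "[]")
--             .replace(".", "..")
--             .replace("@", "@.")
--         )
--         new_grid.append(line)
--     return new_grid
-- ===== SOURCE B (Python) =====
-- _MAP = {"#": "##", "O": "[]", ".": "..", "@": "@."}
--
-- def expand_grid_str(grid_str):
--     return ["".join(_MAP.get(c, c) for c in row) for row in grid_str]
-- ===== Notes on version B (the rewrite author's own statement) =====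
-- stated objective: idiomatic
-- what changed: Replaces the four sequential full-string .replace passes per row with a single character-by-character pass using one lookup table, joined once per row.
import Mathlib
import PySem

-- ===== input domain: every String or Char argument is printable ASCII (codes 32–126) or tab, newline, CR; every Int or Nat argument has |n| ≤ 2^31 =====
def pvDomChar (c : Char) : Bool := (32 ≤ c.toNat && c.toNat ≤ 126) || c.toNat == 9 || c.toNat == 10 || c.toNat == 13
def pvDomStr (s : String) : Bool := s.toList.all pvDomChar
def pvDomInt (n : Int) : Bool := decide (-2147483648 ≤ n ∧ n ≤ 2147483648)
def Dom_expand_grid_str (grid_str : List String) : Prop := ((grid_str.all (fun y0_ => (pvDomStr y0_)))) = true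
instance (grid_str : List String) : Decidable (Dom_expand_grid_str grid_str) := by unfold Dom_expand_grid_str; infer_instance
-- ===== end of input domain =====

-- B replaces A's four sequential full-string .replace passes per row by one character-by-character pass with a lookup table (idiomatic, same cost class).

-- ===== PORT A =====
def expand_grid_str (grid_str : List String) : List String :=
  grid_str.foldl
    (fun new_grid row =>
      new_grid ++
        [PySem.Str.replace
          (PySem.Str.replace
            (PySem.Str.replace
              (PySem.Str.replace row "#" "##")
              "O" "[]")
            "." "..")
          "@" "@."])
    []

-- ===== PORT B =====
def pvExpandMap : PySem.Dict Char String :=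
  PySem.Dict.mk [('#', "##"), ('O', "[]"), ('.', ".."), ('@', "@.")]

def expand_grid_str_alt (grid_str : List String) : List String :=
  grid_str.map (fun row =>
    PySem.Str.join ""
      (row.toList.map (fun c => (PySem.Dict.get? pvExpandMap c).getD (String.ofList [c]))))

-- ===== PRECONDITION & SPEC =====
def Spec_expand_grid_str (grid_str : List String) (out : List String) : Prop := out = expand_grid_str_alt grid_str
instance (grid_str : List String) (out : List String) : Decidable (Spec_expand_grid_str grid_str out) := by unfold Spec_expand_grid_str; infer_instance

-- ===== CLAIM (what is proved, stated in full; the proofs are below) =====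
def Claim_equal_expand_grid_str : Prop := ∀ (grid_str : List String), Dom_expand_grid_str grid_str → Spec_expand_grid_str grid_str (expand_grid_str grid_str)

-- ===== LEMMAS AND PROOFS =====

-- Chars.replace.go with a single-character pattern and enough fuel is a flatMap.
theorem pvGoSingle (o : Char) (new : List Char) :
    ∀ (fuel : Nat) (l acc : List Char), l.length ≤ fuel →
      PySem.Chars.replace.go [o] new fuel l acc =
        acc.reverse ++ l.flatMap (fun c => if c = o then new else [c]) := by
  intro fuel
  induction fuel with
  | zero =>
    intro l acc h
    have : l = [] := List.eq_nil_of_length_eq_zero (Nat.le_zero.mp h)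
    subst this
    simp [PySem.Chars.replace.go]
  | succ n ih =>
    intro l acc h
    cases l with
    | nil => simp [PySem.Chars.replace.go]
    | cons c t =>
      by_cases hc : c = o
      · subst hc
        have hpre : List.isPrefixOf [c] (c :: t) = true := by
          simp [List.isPrefixOf]
        rw [PySem.Chars.replace.go]
        simp only [hpre, if_true]
        rw [show List.drop [c].length (c :: t) = t from rfl]
        rw [ih t (new.reverse ++ acc) (by simpa using Nat.le_of_succ_le_succ h)]
        simp
      · have hpre : List.isPrefixOf [o] (c :: t) = false := by
          simp only [List.isPrefixOf, List.isPrefixOf_nil_left, Bool.and_true,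
            beq_eq_false_iff_ne, ne_eq]
          intro h'; exact hc h'.symm
        rw [PySem.Chars.replace.go]
        simp only [hpre, Bool.false_eq_true, if_false]
        rw [ih t (c :: acc) (by simpa using Nat.le_of_succ_le_succ h)]
        simp [hc]

theorem pvReplaceSingle (s : List Char) (o : Char) (new : List Char) :
    PySem.Chars.replace s [o] new = s.flatMap (fun c => if c = o then new else [c]) := by
  rw [PySem.Chars.replace]
  simp only [List.isEmpty_cons, Bool.false_eq_true, if_false]
  simpa using pvGoSingle o new s.length s [] (le_refl _)

-- the four chained single-character replaces act per character exactly as B's table lookup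
theorem pvCharComp (c : Char) :
    (if c = '#' then ['#','#'] else [c]).flatMap (fun d =>
      (if d = 'O' then ['[',']'] else [d]).flatMap (fun e =>
        (if e = '.' then ['.','.'] else [e]).flatMap (fun f =>
          if f = '@' then ['@','.'] else [f]))) =
      ((PySem.Dict.get? pvExpandMap c).getD (String.ofList [c])).toList := by
  by_cases h1 : c = '#'
  · subst h1; decide
  · by_cases h2 : c = 'O'
    · subst h2; decide
    · by_cases h3 : c = '.'
      · subst h3; decide
      · by_cases h4 : c = '@'
        · subst h4; decide
        · have hm : PySem.Dict.get? pvExpandMap c = none := by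
            simp [pvExpandMap, beq_iff_eq, Ne.symm h1, Ne.symm h2, Ne.symm h3, Ne.symm h4,
              PySem.Dict.get?]
          simp [hm, h1, h2, h3, h4]

theorem pvRowEq (row : String) :
    PySem.Str.replace
        (PySem.Str.replace (PySem.Str.replace (PySem.Str.replace row "#" "##") "O" "[]") "." "..")
        "@" "@." =
      PySem.Str.join ""
        (row.toList.map (fun c => (PySem.Dict.get? pvExpandMap c).getD (String.ofList [c]))) := by
  apply String.toList_injective
  simp only [PySem.Str.toList_replace, PySem.Str.toList_join]
  rw [show ("#" : String).toList = ['#'] from rfl, show ("O" : String).toList = ['O'] from rfl,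
    show ("." : String).toList = ['.'] from rfl, show ("@" : String).toList = ['@'] from rfl,
    show ("##" : String).toList = ['#','#'] from rfl, show ("[]" : String).toList = ['[',']'] from rfl,
    show (".." : String).toList = ['.','.'] from rfl, show ("@." : String).toList = ['@','.'] from rfl,
    pvReplaceSingle, pvReplaceSingle, pvReplaceSingle, pvReplaceSingle]
  rw [List.flatMap_assoc, List.flatMap_assoc, List.flatMap_assoc]
  have hjoin : ∀ (parts : List (List Char)), PySem.Chars.join ("" : String).toList parts = parts.flatten := by
    intro parts
    show (List.intersperse ([] : List Char) parts).flatten = parts.flatten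
    induction parts with
    | nil => rfl
    | cons p tl ih =>
      cases tl with
      | nil => rfl
      | cons q u => simp_all [List.intersperse]
  rw [List.map_map, hjoin, ← List.flatMap_def]
  refine List.flatMap_congr (fun c _ => ?_)
  simpa using pvCharComp c

theorem pvFoldlAppend (grid : List String) (f : String → String) :
    ∀ acc : List String,
      grid.foldl (fun ng row => ng ++ [f row]) acc = acc ++ grid.map f := by
  induction grid with
  | nil => intro acc; simp
  | cons r t ih => intro acc; simp [List.foldl, ih]

-- ===== VERDICT (by name: the statement is the Claim_ definition above) =====
theorem expand_grid_str_spec : Claim_equal_expand_grid_str := by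
  intro grid _
  unfold Spec_expand_grid_str expand_grid_str expand_grid_str_alt
  rw [pvFoldlAppend grid _ []]
  simp only [List.nil_append]
  exact List.map_congr_left (fun row _ => pvRowEq row)
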